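-- pv_equiv track=rewrite | github.com/sueszli/vector-database-benchmark | dataset/python-mutated/_hipsparse_stub_mapper.py | merge_bad_broken_lines
-- ===== SOURCE A (Python) =====
-- def merge_bad_broken_lines(cu_sig):
--     if False:
--         while True:
--             i = 10
--     cu_sig_processed = []
--     skip_line = None
--     for (line, s) in enumerate(cu_sig):
--         if line != skip_line:
--             if s.endswith(',') or s.endswith(')'):
--                 cu_sig_processed.append(s)
--             else:
--                 break_idx = s.find(',')
--                 if break_idx == -1:
--                     break_idx = s.find(')')
--                 if break_idx == -1:
--                     cu_sig_processed.append(s + cu_sig[line + 1])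
--                     skip_line = line + 1
--                 else:
--                     cu_sig_processed.append(s[:break_idx + 1])
--     return cu_sig_processed
-- ===== SOURCE B (Python) =====
-- def _render(unit):
--     # render one unit independently of the rest of the input
--     if len(unit) == 2:
--         return unit[0] + unit[1]
--     s = unit[0]
--     if s.endswith(',') or s.endswith(')'):
--         return s
--     cut = s.find(',')
--     if cut == -1:
--         cut = s.find(')')
--     return s[:cut + 1]
--
--
-- def merge_bad_broken_lines(cu_sig):
--     # stage 1: group the lines into self-contained units: a line with no ','
--     # and no ')' is unterminated and forms a pair with its successor,
--     # every other line is a unit on its own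
--     units = []
--     it = iter(cu_sig)
--     for s in it:
--         if ',' in s or ')' in s:
--             units.append((s,))
--         else:
--             units.append((s, next(it)))
--     # stage 2: render each unit
--     return [_render(u) for u in units]
-- ===== Notes on version B (the rewrite author's own statement) =====
-- stated objective: alternative
-- what changed: Replaces A's single stateful enumerate loop with a skip_line sentinel (and dead 'if False' code) by two staged passes: first an iterator-driven grouping of the lines into self-contained units (an unterminated line paired with its successor via next(it), other lines alone), then a pure per-unit rendering map that joins pairs and truncates or keeps singletons.
import Mathlib
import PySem

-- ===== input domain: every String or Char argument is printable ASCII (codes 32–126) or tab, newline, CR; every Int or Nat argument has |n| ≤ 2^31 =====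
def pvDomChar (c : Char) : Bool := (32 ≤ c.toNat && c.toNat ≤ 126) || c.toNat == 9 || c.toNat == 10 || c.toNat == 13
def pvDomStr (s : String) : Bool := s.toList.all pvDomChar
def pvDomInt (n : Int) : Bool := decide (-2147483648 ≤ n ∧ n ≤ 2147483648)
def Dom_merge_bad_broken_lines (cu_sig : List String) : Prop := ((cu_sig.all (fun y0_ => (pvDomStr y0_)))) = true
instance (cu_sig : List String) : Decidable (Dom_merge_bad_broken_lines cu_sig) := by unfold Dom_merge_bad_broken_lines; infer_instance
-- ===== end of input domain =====

-- B replaces A's stateful enumerate loop with a skip_line sentinel (and dead 'if False' code) by two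
-- staged passes: group the lines into self-contained units, then render each unit; same return value.


-- ===== PORT A =====
-- one iteration of A's for-loop body; state = (cu_sig_processed, skip_line), p = (line, s).
-- Where Python's cu_sig[line + 1] raises IndexError, pyGetD's default is never claimed: Pre_ excludes those inputs.
def mergeStepA (cu_sig : List String) (st : List String × Option Int) (p : Int × String) : List String × Option Int :=
  if some p.1 ≠ st.2 then
    if PySem.Str.endswith p.2 "," || PySem.Str.endswith p.2 ")" then
      (st.1 ++ [p.2], st.2)
    else
      let break_idx := PySem.Str.find p.2 ","
      let break_idx := if break_idx = -1 then PySem.Str.find p.2 ")" else break_idx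
      if break_idx = -1 then
        (st.1 ++ [p.2 ++ PySem.List.pyGetD cu_sig (p.1 + 1) ""], some (p.1 + 1))
      else
        (st.1 ++ [PySem.Str.slice p.2 none (some (break_idx + 1))], st.2)
  else st

def merge_bad_broken_lines (cu_sig : List String) : List String :=
  ((PySem.List.enumerate cu_sig 0).foldl (mergeStepA cu_sig) ([], none)).1

-- ===== PORT B =====
-- Source B stage 1: group the lines into units; a line with no ',' and no ')' pairs with its successor.
-- In the one spot where Python's next(it) raises StopIteration (a bad last line) the port emits the
-- line as a singleton unit; Pre_ excludes those inputs.
def groupUnits : List String → List (String × Option String)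
  | [] => []
  | s :: rest =>
    if PySem.Str.isIn "," s || PySem.Str.isIn ")" s then
      (s, none) :: groupUnits rest
    else
      match rest with
      | t :: rest' => (s, some t) :: groupUnits rest'
      | [] => [(s, none)]

-- Source B stage 2: render one unit (_render)
def renderUnit (u : String × Option String) : String :=
  match u.2 with
  | some t => u.1 ++ t
  | none =>
    if PySem.Str.endswith u.1 "," || PySem.Str.endswith u.1 ")" then u.1
    else
      let cut := PySem.Str.find u.1 ","
      let cut := if cut = -1 then PySem.Str.find u.1 ")" else cut
      PySem.Str.slice u.1 none (some (cut + 1))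

def merge_bad_broken_lines_alt (cu_sig : List String) : List String :=
  (groupUnits cu_sig).map renderUnit

-- ===== PRECONDITION & SPEC =====
-- a "bad" line (no ',' and no ')') is glued onto its successor; A raises IndexError (and B's next(it)
-- raises StopIteration) exactly when the maximal trailing run of bad lines has odd length.
def pvBadLine (s : String) : Bool := !PySem.Str.isIn "," s && !PySem.Str.isIn ")" s

-- Pre_ excludes exactly the inputs on which the Python A raises IndexError (no value is returned there).
def Pre_merge_bad_broken_lines (cu_sig : List String) : Prop :=
  (cu_sig.reverse.takeWhile pvBadLine).length % 2 = 0
instance (cu_sig : List String) : Decidable (Pre_merge_bad_broken_lines cu_sig) := by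
  unfold Pre_merge_bad_broken_lines; infer_instance

def pvWitness_merge_bad_broken_lines : List String := ["void foo(", "int a,", "int b)"]

def Spec_merge_bad_broken_lines (cu_sig : List String) (out : List String) : Prop := out = merge_bad_broken_lines_alt cu_sig
instance (cu_sig : List String) (out : List String) : Decidable (Spec_merge_bad_broken_lines cu_sig out) := by unfold Spec_merge_bad_broken_lines; infer_instance

-- ===== CLAIM (what is proved, stated in full; the proofs are below) =====
def Claim_equal_merge_bad_broken_lines : Prop := ∀ (cu_sig : List String), Dom_merge_bad_broken_lines cu_sig → Pre_merge_bad_broken_lines cu_sig → Spec_merge_bad_broken_lines cu_sig (merge_bad_broken_lines cu_sig)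

-- ===== LEMMAS AND PROOFS =====

def pvRun (l : List String) : Nat := (l.reverse.takeWhile pvBadLine).length

lemma pvRun_cons_good (s : String) (rest : List String) (h : pvBadLine s = false) :
    pvRun (s :: rest) = pvRun rest := by
  unfold pvRun
  rw [List.reverse_cons, List.takeWhile_append]
  split_ifs with hc
  · simp [h, hc]
  · rfl

lemma pvRun_cons_cons_bad (s t : String) (rest : List String) (h : pvBadLine s = true) :
    pvRun (s :: t :: rest) % 2 = pvRun rest % 2 := by
  unfold pvRun
  rw [List.reverse_cons, List.reverse_cons, List.takeWhile_append, List.takeWhile_append]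
  have hle : (List.takeWhile pvBadLine rest.reverse).length ≤ rest.length := by
    simpa using (List.takeWhile_sublist (l := rest.reverse) pvBadLine).length_le
  by_cases hc : (List.takeWhile pvBadLine rest.reverse).length = rest.reverse.length
  · rw [List.length_reverse] at hc
    by_cases ht : pvBadLine t = true
    · simp [hc, ht, h]
    · have ht' : pvBadLine t = false := by simpa using ht
      simp [hc, ht']
  · rw [List.length_reverse] at hc
    simp only [List.length_reverse, if_neg hc]
    have : ¬ (List.takeWhile pvBadLine rest.reverse).length = (rest.reverse ++ [t]).length := by
      simp; omega
    rw [if_neg this]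

lemma pvRun_singleton_bad (s : String) (h : pvBadLine s = true) : pvRun [s] = 1 := by
  simp [pvRun, h]

lemma pvFind_of_not_bad (s : String) (h : pvBadLine s = false) :
    ¬ ((if PySem.Str.find s "," = -1 then PySem.Str.find s ")" else PySem.Str.find s ",") = -1) := by
  simp [pvBadLine] at h
  split_ifs with hc
  · have h1 : PySem.Chars.isIn [','] s.toList = false := by
      rw [PySem.Chars.isIn_eq_false_iff]
      have := (PySem.Str.find_eq_neg_one_iff (s := s) (sub := ",")).mp hc
      simpa using this
    have h2 := h h1
    simp only [PySem.Str.find_eq_neg_one_iff, not_not]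
    rw [PySem.Chars.isIn_iff_infix] at h2
    simpa using h2
  · exact hc

lemma pvBad_finds (s : String) (h : pvBadLine s = true) :
    PySem.Str.find s "," = -1 ∧ PySem.Str.find s ")" = -1 ∧
    PySem.Str.endswith s "," = false ∧ PySem.Str.endswith s ")" = false := by
  simp [pvBadLine] at h
  obtain ⟨h1, h2⟩ := h
  have f1 : ¬ ",".toList <:+: s.toList := by
    rw [← PySem.Chars.isIn_eq_false_iff]; simpa using h1
  have f2 : ¬ ")".toList <:+: s.toList := by
    rw [← PySem.Chars.isIn_eq_false_iff]; simpa using h2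
  refine ⟨?_, ?_, ?_, ?_⟩
  · rw [PySem.Str.find_eq_neg_one_iff]; simpa using f1
  · rw [PySem.Str.find_eq_neg_one_iff]; simpa using f2
  · rw [Bool.eq_false_iff]; intro he
    exact f1 (by
      have : ",".toList <:+ s.toList := by rw [← PySem.Chars.endswith_iff]; simpa using he
      exact this.isInfix)
  · rw [Bool.eq_false_iff]; intro he
    exact f2 (by
      have : ")".toList <:+ s.toList := by rw [← PySem.Chars.endswith_iff]; simpa using he
      exact this.isInfix)

lemma pvLoop_eq (n : Nat) : ∀ (cu_sig l : List String) (i : Nat) (acc : List String) (sk : Option Int),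
    l.length ≤ n → cu_sig.drop i = l → (∀ j, sk = some j → j < (i : Int)) → pvRun l % 2 = 0 →
    ((PySem.List.enumerate l (i : Int)).foldl (mergeStepA cu_sig) (acc, sk)).1
      = acc ++ (groupUnits l).map renderUnit := by
  induction n with
  | zero =>
    intro cu_sig l i acc sk hlen _ _ _
    have : l = [] := List.eq_nil_of_length_eq_zero (Nat.le_zero.mp hlen)
    subst this
    simp [PySem.List.enumerate, groupUnits]
  | succ n ih =>
    intro cu_sig l i acc sk hlen hdrop hsk hrun
    match l with
    | [] => simp [PySem.List.enumerate, groupUnits]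
    | s :: rest =>
      have hski : (some ((i : Nat) : Int) ≠ sk) := by
        intro hcontra
        have := hsk _ hcontra.symm
        omega
      rw [PySem.List.enumerate_cons, List.foldl_cons]
      by_cases hbad : pvBadLine s = true
      · -- bad line: A merges with the next line and skips it; B pairs it with its successor
        obtain ⟨hf1, hf2, he1, he2⟩ := pvBad_finds s hbad
        simp at hf1 hf2 he1 he2
        match rest with
        | [] =>
          exfalso
          rw [pvRun_singleton_bad s hbad] at hrun
          omega
        | t :: rest' =>
          have hget : PySem.List.pyGetD cu_sig ((i : Int) + 1) "" = t := by
            have h1 : cu_sig[i + 1]? = some t := by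
              rw [← List.getElem?_drop, hdrop]
              rfl
            have : ((i : Int) + 1) = (((i + 1 : Nat)) : Int) := by push_cast; ring
            rw [this, PySem.List.pyGetD_natCast, List.getD, h1]
            rfl
          have hstep : mergeStepA cu_sig (acc, sk) ((i : Int), s)
              = (acc ++ [s ++ t], some ((i : Int) + 1)) := by
            simp only [mergeStepA, if_pos hski]
            simp [he1, he2, hf1, hf2, hget]
          rw [hstep]
          rw [PySem.List.enumerate_cons, List.foldl_cons]
          have hstep2 : mergeStepA cu_sig (acc ++ [s ++ t], some ((i : Int) + 1)) ((i : Int) + 1, t)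
              = (acc ++ [s ++ t], some ((i : Int) + 1)) := by
            simp [mergeStepA]
          rw [hstep2]
          have hcast : ((i : Int) + 1 + 1) = (((i + 2 : Nat)) : Int) := by push_cast; ring
          rw [hcast]
          have hdrop' : cu_sig.drop (i + 2) = rest' := by
            rw [← List.drop_drop, hdrop]
            rfl
          rw [ih cu_sig rest' (i + 2) (acc ++ [s ++ t]) (some ((i : Int) + 1))
              (by simp at hlen ⊢; omega) hdrop'
              (by intro j hj; injection hj with hj; omega)
              (by rw [← pvRun_cons_cons_bad s t rest' hbad]; exact hrun)]
          have hbad2 : PySem.Chars.isIn [','] s.toList = false ∧ PySem.Chars.isIn [')'] s.toList = false := by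
            simpa [pvBadLine] using hbad
          conv_rhs => rw [groupUnits.eq_def]
          simp [hbad2.1, hbad2.2, renderUnit]
      · have hbad' : ¬ (PySem.Chars.isIn [','] s.toList = false ∧ PySem.Chars.isIn [')'] s.toList = false) := by
          simpa [pvBadLine] using hbad
        have hgood : (PySem.Str.isIn "," s || PySem.Str.isIn ")" s) = true := by
          by_contra hc
          simp [PySem.Str.isIn] at hc
          exact hbad' ⟨hc.1, hc.2⟩
        have hdrop' : cu_sig.drop (i + 1) = rest := by
          rw [← List.drop_drop, hdrop]
          rfl
        have hrun' : pvRun rest % 2 = 0 := by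
          rw [← pvRun_cons_good s rest (by simpa using hbad)]; exact hrun
        have hcast : ((i : Int) + 1) = (((i + 1 : Nat)) : Int) := by push_cast; ring
        by_cases hend : PySem.Chars.endswith s.toList [','] = true ∨ PySem.Chars.endswith s.toList [')'] = true
        · have hstep : mergeStepA cu_sig (acc, sk) ((i : Int), s) = (acc ++ [s], sk) := by
            simp only [mergeStepA, if_pos hski]
            rcases hend with h | h <;> simp [h]
          rw [hstep, hcast,
            ih cu_sig rest (i + 1) (acc ++ [s]) sk (by simpa using hlen) hdrop'
              (by intro j hj; have := hsk j hj; omega) hrun']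
          conv_rhs => rw [groupUnits.eq_def]
          simp only [hgood, if_pos]
          rcases hend with h | h <;> simp [renderUnit, h]
        · have hend' : PySem.Chars.endswith s.toList [','] = false ∧ PySem.Chars.endswith s.toList [')'] = false := by
            constructor <;> [skip; skip] <;> simp_all
          have hfind := pvFind_of_not_bad s (by simpa [pvBadLine] using hbad)
          simp at hfind
          have hstep : mergeStepA cu_sig (acc, sk) ((i : Int), s)
              = (acc ++ [PySem.Str.slice s none
                  (some ((if PySem.Str.find s "," = -1 then PySem.Str.find s ")" else PySem.Str.find s ",") + 1))], sk) := by
            simp only [mergeStepA, if_pos hski]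
            simp [hend'.1, hend'.2, hfind]
          rw [hstep, hcast,
            ih cu_sig rest (i + 1) _ sk (by simpa using hlen) hdrop'
              (by intro j hj; have := hsk j hj; omega) hrun']
          conv_rhs => rw [groupUnits.eq_def]
          simp only [hgood, if_pos]
          simp [renderUnit, hend'.1, hend'.2]

-- ===== VERDICT (by name: the statement is the Claim_ definition above) =====
theorem merge_bad_broken_lines_spec : Claim_equal_merge_bad_broken_lines := by
  intro cu_sig _ hpre
  unfold Spec_merge_bad_broken_lines merge_bad_broken_lines merge_bad_broken_lines_alt
  simpa using pvLoop_eq cu_sig.length cu_sig cu_sig 0 [] none (le_refl _) rfl (by simp) hpre
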